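-- pv_equiv track=rewrite | github.com/RiverYanggg/SteelDig_multimodal | paper_extractor/knowledge/synthesis_payload.py | _group_claims
-- ===== SOURCE A (Python) =====
-- from typing import Any, Dict, Iterable, List, Tuple
--
-- CORE_BUCKET_ORDER = [
--     "material_system",
--     "processing",
--     "structure",
--     "properties",
--     "mechanisms",
--     "characterization",
-- ]
--
-- def _group_claims(claims: List[Dict[str, Any]]) -> Dict[str, List[Dict[str, Any]]]:
--     grouped: Dict[str, List[Dict[str, Any]]] = {bucket: [] for bucket in CORE_BUCKET_ORDER}
--     for claim in claims:
--         bucket = claim.get("topic")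
--         if bucket not in grouped:
--             continue
--         grouped[bucket].append(claim)
--     return {bucket: grouped[bucket] for bucket in CORE_BUCKET_ORDER if grouped[bucket]}
-- ===== SOURCE B (Python) =====
-- CORE_BUCKET_ORDER = [
--     "material_system",
--     "processing",
--     "structure",
--     "properties",
--     "mechanisms",
--     "characterization",
-- ]
--
-- def _group_claims(claims):
--     result = {}
--     for bucket in CORE_BUCKET_ORDER:
--         matched = [c for c in claims if c.get("topic") == bucket]
--         if matched:
--             result[bucket] = matched
--     return result
-- ===== Notes on version B (the rewrite author's own statement) =====
-- stated objective: idiomatic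
-- what changed: Replaces A's single dispatch pass into a pre-seeded dict (plus a pruning dict comprehension) by one filtering scan of claims per bucket, building only the non-empty buckets directly in bucket order.
import Mathlib
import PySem

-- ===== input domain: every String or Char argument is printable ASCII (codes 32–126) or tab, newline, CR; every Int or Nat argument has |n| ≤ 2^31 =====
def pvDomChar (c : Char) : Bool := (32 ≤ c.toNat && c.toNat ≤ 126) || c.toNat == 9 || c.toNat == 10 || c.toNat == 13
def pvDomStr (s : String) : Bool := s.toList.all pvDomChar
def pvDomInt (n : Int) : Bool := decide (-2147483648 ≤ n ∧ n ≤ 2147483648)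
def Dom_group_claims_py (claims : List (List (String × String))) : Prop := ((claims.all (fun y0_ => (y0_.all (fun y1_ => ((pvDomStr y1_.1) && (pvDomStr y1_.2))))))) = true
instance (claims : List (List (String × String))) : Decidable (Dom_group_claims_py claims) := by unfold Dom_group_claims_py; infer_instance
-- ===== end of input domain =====

-- B replaces A's single dispatch pass (pre-seeded dict + pruning comprehension) by one
-- filtering scan of claims per bucket, emitting only non-empty buckets in order (idiomatic).

-- CORE_BUCKET_ORDER
def pvBuckets : List String :=
  ["material_system", "processing", "structure", "properties", "mechanisms", "characterization"]

-- ===== PORT A =====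
-- loop body: bucket = claim.get("topic"); if bucket not in grouped: continue; grouped[bucket].append(claim)
def pvStep (d : PySem.Dict String (List (List (String × String)))) (claim : List (String × String)) :
    PySem.Dict String (List (List (String × String))) :=
  match (PySem.Dict.mk claim).get? "topic" with
  | none => d            -- bucket is None, never a key of grouped: continue
  | some b => if d.contains b then d.modify b [] (fun l => l ++ [claim]) else d

def group_claims_py (claims : List (List (String × String))) : List (String × List (List (String × String))) :=
  let grouped := pvBuckets.foldl (fun d b => d.insert b ([] : List (List (String × String)))) PySem.Dict.empty
  let grouped := claims.foldl pvStep grouped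
  -- {bucket: grouped[bucket] for bucket in CORE_BUCKET_ORDER if grouped[bucket]}
  (pvBuckets.foldl (fun out b =>
      match grouped.get? b with
      | some v => if v.isEmpty then out else out.insert b v
      | none => out        -- unreachable: every bucket was seeded into grouped (KeyError otherwise)
    ) PySem.Dict.empty).items

-- ===== PORT B =====
def group_claims_py_alt (claims : List (List (String × String))) : List (String × List (List (String × String))) :=
  pvBuckets.foldl (fun res bucket =>
    let matched := claims.filter (fun c => (PySem.Dict.mk c).get? "topic" == some bucket)
    if !matched.isEmpty then res ++ [(bucket, matched)] else res) []

-- ===== PRECONDITION & SPEC =====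
def Spec_group_claims_py (claims : List (List (String × String))) (out : List (String × List (List (String × String)))) : Prop := out = group_claims_py_alt claims
instance (claims : List (List (String × String))) (out : List (String × List (List (String × String)))) : Decidable (Spec_group_claims_py claims out) := by unfold Spec_group_claims_py; infer_instance

-- ===== CLAIM (what is proved, stated in full; the proofs are below) =====
def Claim_equal_group_claims_py : Prop := ∀ (claims : List (List (String × String))), Dom_group_claims_py claims → Spec_group_claims_py claims (group_claims_py claims)

-- ===== LEMMAS AND PROOFS =====

-- the per-bucket membership/filter predicate B uses
def pvPred (b : String) (c : List (String × String)) : Bool :=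
  (PySem.Dict.mk c).get? "topic" == some b

theorem pvStep_contains (claims : List (List (String × String)))
    (d : PySem.Dict String (List (List (String × String)))) (x : String) :
    (claims.foldl pvStep d).contains x = d.contains x := by
  induction claims generalizing d with
  | nil => rfl
  | cons c rest ih =>
    simp only [List.foldl_cons]
    rw [ih]
    unfold pvStep
    cases (PySem.Dict.mk c).get? "topic" with
    | none => rfl
    | some t =>
      by_cases h : d.contains t = true
      · simp only [h, if_true, PySem.Dict.contains_modify]
        by_cases hxt : x = t
        · subst hxt; simp [h]
        · simp [hxt]
      · simp [h]

theorem pvStep_getD (claims : List (List (String × String)))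
    (d : PySem.Dict String (List (List (String × String)))) (b : String)
    (hb : d.contains b = true) :
    (claims.foldl pvStep d).getD b [] = d.getD b [] ++ claims.filter (pvPred b) := by
  induction claims generalizing d with
  | nil => simp
  | cons c rest ih =>
    simp only [List.foldl_cons, List.filter_cons]
    have hpred : pvPred b c = ((PySem.Dict.mk c).get? "topic" == some b) := rfl
    cases htop : (PySem.Dict.mk c).get? "topic" with
    | none =>
      have h1 : pvStep d c = d := by unfold pvStep; rw [htop]
      rw [h1, ih d hb]
      simp [hpred, htop]
    | some t =>
      by_cases h : d.contains t = true
      · have h1 : pvStep d c = d.modify t [] (fun l => l ++ [c]) := by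
          unfold pvStep; rw [htop]; simp [h]
        have hb' : (d.modify t [] (fun l => l ++ [c])).contains b = true := by
          rw [PySem.Dict.contains_modify]; simp [hb]
        rw [h1, ih _ hb', PySem.Dict.getD_modify]
        by_cases hbt : b = t
        · subst hbt
          simp [hpred, htop]
        · have ht : (t == b) = false := by simp [Ne.symm hbt]
          simp [hpred, htop, ht, hbt]
      · have h1 : pvStep d c = d := by unfold pvStep; rw [htop]; simp [h]
        rw [h1, ih d hb]
        have hp : pvPred b c = false := by
          rw [hpred, htop]
          by_cases hbt : t = b
          · subst hbt; exact absurd hb h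
          · simp [hbt]
        simp [hp]

theorem pvStep_get? (claims : List (List (String × String)))
    (d : PySem.Dict String (List (List (String × String)))) (b : String)
    (v : List (List (String × String))) (hb : d.get? b = some v) :
    (claims.foldl pvStep d).get? b = some (v ++ claims.filter (pvPred b)) := by
  have hc : d.contains b = true := by
    rw [PySem.Dict.contains_eq_isSome_get?, hb]; rfl
  have hc' : (claims.foldl pvStep d).contains b = true := by
    rw [pvStep_contains]; exact hc
  have hsome : ((claims.foldl pvStep d).get? b).isSome := by
    rw [← PySem.Dict.contains_eq_isSome_get?]; exact hc'
  obtain ⟨w, hw⟩ := Option.isSome_iff_exists.mp hsome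
  have h1 : (claims.foldl pvStep d).getD b [] = w := PySem.Dict.getD_of_get?_eq_some _ _ hw
  have h2 : d.getD b [] = v := PySem.Dict.getD_of_get?_eq_some _ _ hb
  rw [pvStep_getD claims d b hc, h2] at h1
  rw [hw, ← h1]

-- items of a conditional fresh-key insert loop
theorem pvItems_condInsert (F : String → List (List (String × String))) :
    ∀ (bs : List String) (out : PySem.Dict String (List (List (String × String)))),
    bs.Nodup → (∀ b ∈ bs, out.contains b = false) →
    (bs.foldl (fun o b => if (F b).isEmpty then o else o.insert b (F b)) out).items
      = out.items ++ (bs.filter (fun b => !(F b).isEmpty)).map (fun b => (b, F b)) := by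
  intro bs
  induction bs with
  | nil => intro out _ _; simp
  | cons b rest ih =>
    intro out hnd hfresh
    have hndr : rest.Nodup := (List.nodup_cons.mp hnd).2
    have hbne : b ∉ rest := (List.nodup_cons.mp hnd).1
    simp only [List.foldl_cons, List.filter_cons]
    by_cases he : (F b).isEmpty = true
    · rw [if_pos he, ih out hndr (fun x hx => hfresh x (List.mem_cons_of_mem _ hx))]
      simp [he]
    · rw [if_neg he]
      have hfb : out.contains b = false := hfresh b (List.mem_cons_self ..)
      have hfresh' : ∀ x ∈ rest, (out.insert b (F b)).contains x = false := by
        intro x hx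
        rw [PySem.Dict.contains_insert]
        have hxb : (x == b) = false := by
          simp only [beq_eq_false_iff_ne]
          intro h; exact hbne (h ▸ hx)
        simp [hxb, hfresh x (List.mem_cons_of_mem _ hx)]
      rw [ih _ hndr hfresh', PySem.Dict.items_insert_of_not_contains _ _ hfb]
      simp [he]

-- the seeded dict: every bucket maps to []
def pvInit : PySem.Dict String (List (List (String × String))) :=
  pvBuckets.foldl (fun d b => d.insert b ([] : List (List (String × String)))) PySem.Dict.empty

theorem pvInit_get? (b : String) (hb : b ∈ pvBuckets) : pvInit.get? b = some [] := by
  simp only [pvBuckets] at hb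
  fin_cases hb <;> decide

theorem group_claims_py_eq (claims : List (List (String × String))) :
    group_claims_py claims = group_claims_py_alt claims := by
  have hB : group_claims_py_alt claims
      = (pvBuckets.filter (fun b => !(claims.filter (pvPred b)).isEmpty)).map
          (fun b => (b, claims.filter (pvPred b))) := by
    have h := PySem.List.foldl_append_if
      (l := pvBuckets) (acc := ([] : List (String × List (List (String × String)))))
      (fun b => !(claims.filter (pvPred b)).isEmpty)
      (fun b => (b, claims.filter (pvPred b)))
    exact h.trans (by simp)
  rw [hB]
  have hF : ∀ b ∈ pvBuckets,
      (claims.foldl pvStep pvInit).get? b = some (claims.filter (pvPred b)) := by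
    intro b hb
    have := pvStep_get? claims pvInit b [] (pvInit_get? b hb)
    simpa using this
  have hcongr : pvBuckets.foldl (fun out b =>
      match (claims.foldl pvStep pvInit).get? b with
      | some v => if v.isEmpty then out else out.insert b v
      | none => out) PySem.Dict.empty
      = pvBuckets.foldl (fun o b =>
          if (claims.filter (pvPred b)).isEmpty then o
          else o.insert b (claims.filter (pvPred b))) PySem.Dict.empty := by
    apply PySem.List.foldl_congr_mem
    intro acc b hb
    rw [hF b hb]
  show (pvBuckets.foldl (fun out b =>
      match (claims.foldl pvStep pvInit).get? b with
      | some v => if v.isEmpty then out else out.insert b v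
      | none => out) PySem.Dict.empty).items = _
  rw [hcongr,
    pvItems_condInsert (fun b => claims.filter (pvPred b)) pvBuckets PySem.Dict.empty
      (by decide) (by intro b _; rfl)]
  simp [show (PySem.Dict.empty : PySem.Dict String (List (List (String × String)))).items = [] from rfl]

-- ===== VERDICT (by name: the statement is the Claim_ definition above) =====
theorem group_claims_py_spec : Claim_equal_group_claims_py := by
  intro claims _
  unfold Spec_group_claims_py
  exact group_claims_py_eq claims
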